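-- pv_equiv track=rewrite | github.com/VelichkinPetr/Algorithms | DZ_2/task_3_reverse_even_elements.py | get_formatted_list
-- ===== SOURCE A (Python) =====
-- def get_list_index_even_elem(array):
--     index_even_list = []
--     for i in range(len(array)):
--         if array[i] % 2 == 0:
--             index_even_list.append(i)
--     return index_even_list
--
-- def reverse_list(array):
--     reverse = []
--     for i in range(-1,-len(array)-1,-1):
--         reverse.append(array[i])
--     return reverse
--
-- def get_formatted_list(array):
--     index_even_list = get_list_index_even_elem(array)
--     reverse_even_list = reverse_list(index_even_list)
--     for i in range(len(index_even_list)//2):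
--         buff = array[index_even_list[i]]
--         array[index_even_list[i]] = array[reverse_even_list[i]]
--         array[reverse_even_list[i]] = buff
--     return array
-- ===== SOURCE B (Python) =====
-- def get_formatted_list(array):
--     evens = [x for x in array if x % 2 == 0]
--     evens.reverse()
--     j = 0
--     for i in range(len(array)):
--         if array[i] % 2 == 0:
--             array[i] = evens[j]
--             j += 1
--     return array
-- ===== Notes on version B (the rewrite author's own statement) =====
-- stated objective: simpler
-- what changed: Replaces the collect-even-indices + symmetric index-pair swap loop with extract-the-even-values, reverse them, and write them back in one forward pass over the array.
import Mathlib
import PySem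

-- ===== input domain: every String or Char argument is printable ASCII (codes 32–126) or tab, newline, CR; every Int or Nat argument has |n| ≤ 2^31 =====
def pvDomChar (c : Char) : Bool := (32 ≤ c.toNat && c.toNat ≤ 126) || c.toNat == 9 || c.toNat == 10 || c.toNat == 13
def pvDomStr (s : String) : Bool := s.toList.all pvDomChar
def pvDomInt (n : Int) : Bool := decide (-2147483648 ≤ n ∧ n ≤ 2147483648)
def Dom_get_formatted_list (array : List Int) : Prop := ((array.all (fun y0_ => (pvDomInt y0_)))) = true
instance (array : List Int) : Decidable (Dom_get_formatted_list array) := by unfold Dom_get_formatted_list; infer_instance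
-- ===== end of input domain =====

-- B reverses the positions of the even-valued elements by extracting the even values, reversing
-- them and writing them back in a single forward pass, instead of A's collect-even-indices and
-- symmetric pairwise swaps; same result, simpler.  Both Pythons mutate `array` in place the same
-- way and return it; the theorems are about the returned value.

-- ===== PORT A =====
-- A-side helpers: every index read/written below is a valid nonnegative position of its list by
-- construction (i from range(len(...)), or an element of the even-index list), so pyGetD/pySetD
-- are exact where Python indexes.
def get_list_index_even_elem (array : List Int) : List Int :=
  (PySem.List.pyRange 0 (PySem.List.len array) 1).foldl
    (fun acc i =>
      if PySem.Int.mod (PySem.List.pyGetD array i 0) 2 == 0 then acc ++ [i] else acc) []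

def reverse_list (array : List Int) : List Int :=
  (PySem.List.pyRange (-1) (-(PySem.List.len array) - 1) (-1)).foldl
    (fun acc i => acc ++ [PySem.List.pyGetD array i 0]) []

def get_formatted_list (array : List Int) : List Int :=
  let idxs := get_list_index_even_elem array
  let revs := reverse_list idxs
  (PySem.List.pyRange 0 (PySem.Int.floordiv (PySem.List.len idxs) 2) 1).foldl
    (fun arr i =>
      let a := PySem.List.pyGetD idxs i 0
      let b := PySem.List.pyGetD revs i 0
      let buff := PySem.List.pyGetD arr a 0
      let arr1 := PySem.List.pySetD arr a (PySem.List.pyGetD arr b 0)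
      PySem.List.pySetD arr1 b buff) array


-- ===== PORT B =====
-- B's writeback pass: walk the array; at each even element take the next value from es
-- (the cursor j into evens is the consumed prefix of evens, so es is the remaining suffix).
def wbEvens (xs : List Int) (es : List Int) : List Int :=
  match xs with
  | [] => []
  | x :: t =>
      if PySem.Int.mod x 2 == 0 then es.headD 0 :: wbEvens t es.tail
      else x :: wbEvens t es

def get_formatted_list_alt (array : List Int) : List Int :=
  wbEvens array ((array.filter (fun x => PySem.Int.mod x 2 == 0)).reverse)

-- ===== PRECONDITION & SPEC =====
def Spec_get_formatted_list (array : List Int) (out : List Int) : Prop := out = get_formatted_list_alt array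
instance (array : List Int) (out : List Int) : Decidable (Spec_get_formatted_list array out) := by unfold Spec_get_formatted_list; infer_instance

-- ===== CLAIM (what is proved, stated in full; the proofs are below) =====
def Claim_equal_get_formatted_list : Prop := ∀ (array : List Int), Dom_get_formatted_list array → Spec_get_formatted_list array (get_formatted_list array)

-- ===== LEMMAS AND PROOFS =====
def pEv (x : Int) : Bool := PySem.Int.mod x 2 == 0

def eIdx (xs : List Int) : List Nat :=
  (List.range xs.length).filter (fun i => pEv (xs.getD i 0))

lemma L1 (xs : List Int) :
    get_list_index_even_elem xs = (eIdx xs).map (fun (n : Nat) => (n : Int)) := by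
  unfold get_list_index_even_elem
  rw [PySem.List.len_eq, PySem.List.pyRange_zero_nat, List.foldl_map]
  simp only [PySem.List.pyGetD_natCast]
  rw [PySem.List.foldl_append_if (fun k => PySem.Int.mod (xs.getD k 0) 2 == 0) (fun k => (k : Int))]
  simp [eIdx, pEv]

lemma L2 (ys : List Int) : reverse_list ys = ys.reverse := by
  unfold reverse_list
  rw [PySem.List.len_eq, PySem.List.pyRange_neg_one, List.foldl_map,
    PySem.List.foldl_append_singleton_eq_map]
  have hn : (-1 - (-(ys.length : Int) - 1)).toNat = ys.length := by omega
  rw [hn, List.nil_append]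
  apply List.ext_getElem (by simp)
  intro i h1 h2
  simp only [List.getElem_map, List.getElem_range, List.getElem_reverse]
  simp only [List.length_map, List.length_range] at h1
  have : (-1 - (i : Int)) = -(((i+1 : Nat) : Int)) := by push_cast; ring
  rw [this, PySem.List.pyGetD_neg_natCast ys (i+1) 0 (by omega) (by omega)]
  congr 1
  omega

lemma eIdx_cons (x : Int) (t : List Int) :
    eIdx (x :: t) = (if pEv x then [0] else []) ++ (eIdx t).map (· + 1) := by
  simp only [eIdx, List.length_cons, List.range_succ_eq_map]
  rw [List.filter_cons, List.filter_map]
  simp only [List.getD_cons_zero]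
  have hfil : List.filter ((fun i => pEv ((x :: t).getD i 0)) ∘ Nat.succ) (List.range t.length)
      = List.filter (fun i => pEv (t.getD i 0)) (List.range t.length) := by
    apply List.filter_congr
    intro i _
    simp [Function.comp]
  have hmap : (Nat.succ : Nat → Nat) = (fun x => x + 1) := by funext n; rfl
  rw [hfil, hmap]
  split <;> simp

lemma eIdx_lt {xs : List Int} {a : Nat} (h : a ∈ eIdx xs) : a < xs.length := by
  have := List.mem_range.mp (List.mem_of_mem_filter h)
  exact this

lemma eIdx_pairwise (xs : List Int) : (eIdx xs).Pairwise (· < ·) :=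
  List.Pairwise.filter _ List.pairwise_lt_range

lemma eIdx_getD_lt {xs : List Int} {r : Nat} (h : r < (eIdx xs).length) :
    (eIdx xs).getD r 0 < xs.length := by
  have : (eIdx xs).getD r 0 ∈ eIdx xs := by
    rw [List.getD_eq_getElem?_getD, List.getElem?_eq_getElem h]
    exact List.getElem_mem h
  exact eIdx_lt this

lemma eIdx_getD_mono {xs : List Int} {r s : Nat} (hrs : r < s) (h : s < (eIdx xs).length) :
    (eIdx xs).getD r 0 < (eIdx xs).getD s 0 := by
  rw [List.getD_eq_getElem?_getD, List.getD_eq_getElem?_getD,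
    List.getElem?_eq_getElem h, List.getElem?_eq_getElem (lt_trans hrs h)]
  exact (List.pairwise_iff_getElem.mp (eIdx_pairwise xs)) _ _ _ _ hrs

lemma eIdx_getD_inj {xs : List Int} {r s : Nat} (hr : r < (eIdx xs).length)
    (hs : s < (eIdx xs).length) (h : (eIdx xs).getD r 0 = (eIdx xs).getD s 0) : r = s := by
  rcases Nat.lt_trichotomy r s with hlt | he | hgt
  · exact absurd h (Nat.ne_of_lt (eIdx_getD_mono hlt hs))
  · exact he
  · exact absurd h.symm (Nat.ne_of_lt (eIdx_getD_mono hgt hr))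

lemma eIdx_getD_mem {xs : List Int} {r : Nat} (h : r < (eIdx xs).length) :
    (eIdx xs).getD r 0 ∈ eIdx xs := by
  rw [List.getD_eq_getElem?_getD, List.getElem?_eq_getElem h]
  exact List.getElem_mem h

-- xs restricted to its even positions is xs.filter pEv
lemma filter_eq_map_eIdx (xs : List Int) :
    xs.filter pEv = (eIdx xs).map (fun i => xs.getD i 0) := by
  induction xs with
  | nil => rfl
  | cons x t ih =>
      rw [List.filter_cons, eIdx_cons, List.map_append, List.map_map]
      by_cases hp : pEv x <;>
        simp [hp, ih, Function.comp]

lemma wb_length (xs es : List Int) : (wbEvens xs es).length = xs.length := by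
  induction xs generalizing es with
  | nil => rfl
  | cons x t ih => unfold wbEvens; split <;> simp [ih]

lemma wb_get (xs : List Int) : ∀ es : List Int, (eIdx xs).length ≤ es.length →
    (∀ r, r < (eIdx xs).length → (wbEvens xs es)[(eIdx xs).getD r 0]? = es[r]?) ∧
    (∀ m, m ∉ eIdx xs → (wbEvens xs es)[m]? = xs[m]?) := by
  induction xs with
  | nil =>
      intro es _
      exact ⟨fun r hr => absurd hr (by simp [eIdx]), fun m _ => by simp [wbEvens]⟩
  | cons x t ih =>
      intro es hk
      by_cases hp : pEv x
      · have hI : eIdx (x :: t) = 0 :: (eIdx t).map (· + 1) := by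
          rw [eIdx_cons, if_pos hp]; rfl
        have hwb : wbEvens (x :: t) es = es.headD 0 :: wbEvens t es.tail := by
          show (if PySem.Int.mod x 2 == 0 then es.headD 0 :: wbEvens t es.tail
            else x :: wbEvens t es) = _
          rw [if_pos (by simpa [pEv] using hp)]
        rw [hI] at hk ⊢
        simp only [List.length_cons, List.length_map] at hk
        have hes : 0 < es.length := by omega
        have htl : (eIdx t).length ≤ es.tail.length := by
          simp [List.length_tail]; omega
        obtain ⟨ih1, ih2⟩ := ih es.tail htl
        refine ⟨?_, ?_⟩
        · intro r hr
          match r with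
          | 0 =>
              rw [hwb]
              cases es with
              | nil => simp at hes
              | cons e es' => simp
          | (r+1) =>
              have hr' : r < (eIdx t).length := by
                simpa using hr
              have hidx : ((0:Nat) :: (eIdx t).map (· + 1)).getD (r+1) 0
                  = (eIdx t).getD r 0 + 1 := by
                rw [List.getD_eq_getElem?_getD, List.getElem?_cons_succ, List.getElem?_map,
                  List.getElem?_eq_getElem hr']
                simp [List.getD_eq_getElem?_getD, List.getElem?_eq_getElem hr']
              rw [hidx, hwb, List.getElem?_cons_succ, ih1 r hr', List.getElem?_tail]
        · intro m hm
          match m with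
          | 0 => exact absurd List.mem_cons_self hm
          | (m+1) =>
              have hm' : m ∉ eIdx t := fun hc =>
                hm (List.mem_cons_of_mem _ (List.mem_map.mpr ⟨m, hc, rfl⟩))
              rw [hwb, List.getElem?_cons_succ, List.getElem?_cons_succ, ih2 m hm']
      · have hI : eIdx (x :: t) = (eIdx t).map (· + 1) := by
          rw [eIdx_cons, if_neg (by simpa using hp), List.nil_append]
        have hwb : wbEvens (x :: t) es = x :: wbEvens t es := by
          show (if PySem.Int.mod x 2 == 0 then es.headD 0 :: wbEvens t es.tail
            else x :: wbEvens t es) = _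
          rw [if_neg (by simpa [pEv] using hp)]
        rw [hI] at hk ⊢
        simp only [List.length_map] at hk
        obtain ⟨ih1, ih2⟩ := ih es hk
        refine ⟨?_, ?_⟩
        · intro r hr
          have hr' : r < (eIdx t).length := by simpa using hr
          have hidx : ((eIdx t).map (· + 1)).getD r 0 = (eIdx t).getD r 0 + 1 := by
            rw [List.getD_eq_getElem?_getD, List.getElem?_map, List.getElem?_eq_getElem hr']
            simp [List.getD_eq_getElem?_getD, List.getElem?_eq_getElem hr']
          rw [hidx, hwb, List.getElem?_cons_succ, ih1 r hr']
        · intro m hm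
          match m with
          | 0 => simp [hwb]
          | (m+1) =>
              have hm' : m ∉ eIdx t := fun hc => hm (List.mem_map.mpr ⟨m, hc, rfl⟩)
              rw [hwb, List.getElem?_cons_succ, List.getElem?_cons_succ, ih2 m hm']

def swapN (arr : List Int) (a b : Nat) : List Int :=
  (arr.set a (arr.getD b 0)).set b (arr.getD a 0)

lemma swapN_length (arr : List Int) (a b : Nat) : (swapN arr a b).length = arr.length := by
  simp [swapN]

lemma swapN_getElem? (arr : List Int) (a b j : Nat) (ha : a < arr.length) (hb : b < arr.length) :
    (swapN arr a b)[j]? =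
      if b = j then some (arr.getD a 0)
      else if a = j then some (arr.getD b 0)
      else arr[j]? := by
  simp only [swapN, List.getElem?_set, List.length_set]
  rcases eq_or_ne b j with rfl | h1
  · rw [if_pos rfl, if_pos rfl, if_pos hb]
  · rw [if_neg h1, if_neg h1]
    rcases eq_or_ne a j with rfl | h2
    · rw [if_pos rfl, if_pos rfl, if_pos ha]
    · rw [if_neg h2, if_neg h2]

-- the state of A's swap loop after t iterations
def swapLoop (xs : List Int) (t : Nat) : List Int :=
  (List.range t).foldl
    (fun arr i => swapN arr ((eIdx xs).getD i 0)
      ((eIdx xs).getD ((eIdx xs).length - 1 - i) 0)) xs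

lemma swapLoop_inv (xs : List Int) (t : Nat) (ht : t ≤ (eIdx xs).length / 2) :
    (swapLoop xs t).length = xs.length ∧
    (∀ r, r < (eIdx xs).length →
      (swapLoop xs t)[(eIdx xs).getD r 0]? =
        some (xs.getD ((eIdx xs).getD
          (if r < t ∨ (eIdx xs).length - 1 - r < t then (eIdx xs).length - 1 - r else r) 0) 0)) ∧
    (∀ m, m ∉ eIdx xs → (swapLoop xs t)[m]? = xs[m]?) := by
  induction t with
  | zero =>
      refine ⟨rfl, ?_, fun m _ => rfl⟩
      intro r hr
      rw [swapLoop, List.range_zero, List.foldl_nil,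
        if_neg (by omega : ¬(r < 0 ∨ (eIdx xs).length - 1 - r < 0))]
      have hj : (eIdx xs).getD r 0 < xs.length := eIdx_getD_lt hr
      rw [List.getD_eq_getElem?_getD (l := xs), List.getElem?_eq_getElem hj]
      rfl
  | succ t ih =>
      obtain ⟨ihl, ih1, ih2⟩ := ih (by omega)
      have hk2 : 2 * t + 2 ≤ (eIdx xs).length := by omega
      set k := (eIdx xs).length with hkdef
      have htk : t < k := by omega
      have htk2 : k - 1 - t < k := by omega
      have htlt : t < k - 1 - t := by omega
      set a := (eIdx xs).getD t 0 with hadef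
      set b := (eIdx xs).getD (k - 1 - t) 0 with hbdef
      have hab : a < b := eIdx_getD_mono htlt htk2
      have haL : a < xs.length := eIdx_getD_lt htk
      have hbL : b < xs.length := eIdx_getD_lt htk2
      have hstep : swapLoop xs (t+1) = swapN (swapLoop xs t) a b := by
        rw [swapLoop, List.range_succ, List.foldl_append, List.foldl_cons, List.foldl_nil]
        rfl
      -- the two cells being swapped still hold their original values
      have hLa : (swapLoop xs t)[a]? = some (xs.getD a 0) := by
        have := ih1 t htk
        rwa [if_neg (by omega)] at this
      have hLb : (swapLoop xs t)[b]? = some (xs.getD b 0) := by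
        have h1 := ih1 (k - 1 - t) htk2
        rw [if_neg (by omega : ¬(k - 1 - t < t ∨ k - 1 - (k - 1 - t) < t))] at h1
        exact h1
      have hLa' : (swapLoop xs t).getD a 0 = xs.getD a 0 := by
        rw [List.getD_eq_getElem?_getD, hLa]; rfl
      have hLb' : (swapLoop xs t).getD b 0 = xs.getD b 0 := by
        rw [List.getD_eq_getElem?_getD, hLb]; rfl
      have haL' : a < (swapLoop xs t).length := by rw [ihl]; exact haL
      have hbL' : b < (swapLoop xs t).length := by rw [ihl]; exact hbL
      refine ⟨by rw [hstep, swapN_length, ihl], ?_, ?_⟩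
      · intro r hr
        rw [hstep, swapN_getElem? _ _ _ _ haL' hbL', hLa', hLb']
        by_cases hrb : b = (eIdx xs).getD r 0
        · have hre : r = k - 1 - t := eIdx_getD_inj hr htk2 hrb.symm
          rw [if_pos hrb, if_pos (by omega : r < t + 1 ∨ k - 1 - r < t + 1), hre,
            (by omega : k - 1 - (k - 1 - t) = t)]
        · rw [if_neg hrb]
          by_cases hra : a = (eIdx xs).getD r 0
          · have hre : r = t := eIdx_getD_inj hr htk hra.symm
            rw [if_pos hra, if_pos (by omega : r < t + 1 ∨ k - 1 - r < t + 1), hre]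
          · have hrt : r ≠ t := fun h => hra (by rw [h])
            have hrt2 : r ≠ k - 1 - t := fun h => hrb (by rw [h])
            rw [if_neg hra, ih1 r hr]
            have hiff : (r < t + 1 ∨ k - 1 - r < t + 1) ↔ (r < t ∨ k - 1 - r < t) := by
              constructor
              · rintro (h | h)
                · left; omega
                · right; omega
              · rintro (h | h)
                · left; omega
                · right; omega
            by_cases hc : r < t ∨ k - 1 - r < t
            · rw [if_pos hc, if_pos (hiff.mpr hc)]
            · rw [if_neg hc, if_neg (fun h => hc (hiff.mp h))]
      · intro m hm
        have hma : a ≠ m := fun h => hm (h ▸ eIdx_getD_mem htk)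
        have hmb : b ≠ m := fun h => hm (h ▸ eIdx_getD_mem htk2)
        rw [hstep, swapN_getElem? _ _ _ _ haL' hbL', if_neg hmb, if_neg hma, ih2 m hm]

lemma getD_map_cast (I : List Nat) (t : Nat) (h : t < I.length) :
    (I.map (fun (n : Nat) => (n : Int))).getD t 0 = ((I.getD t 0 : Nat) : Int) := by
  rw [List.getD_eq_getElem?_getD, List.getElem?_map, List.getElem?_eq_getElem h,
    List.getD_eq_getElem?_getD, List.getElem?_eq_getElem h]
  rfl

lemma getD_reverse (I : List Nat) (t : Nat) (h : t < I.length) :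
    I.reverse.getD t 0 = I.getD (I.length - 1 - t) 0 := by
  rw [List.getD_eq_getElem?_getD, List.getD_eq_getElem?_getD,
    List.getElem?_reverse h]

lemma L3 (xs : List Int) :
    get_formatted_list xs = swapLoop xs ((eIdx xs).length / 2) := by
  simp only [get_formatted_list, L1, L2, PySem.List.len_eq, List.length_map]
  have hdiv : PySem.Int.floordiv ((eIdx xs).length : Int) 2 = (((eIdx xs).length / 2 : Nat) : Int) := by
    exact_mod_cast PySem.Int.floordiv_natCast (eIdx xs).length 2
  rw [hdiv, PySem.List.pyRange_zero_nat, List.foldl_map, swapLoop]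
  apply PySem.List.foldl_congr_mem
  intro arr t hmem
  have ht : t < (eIdx xs).length / 2 := List.mem_range.mp hmem
  have htk : t < (eIdx xs).length := by omega
  have htk2 : (eIdx xs).length - 1 - t < (eIdx xs).length := by omega
  have hrev : (List.map (fun (n : Nat) => (n : Int)) (eIdx xs)).reverse
      = (eIdx xs).reverse.map (fun (n : Nat) => (n : Int)) := List.map_reverse.symm
  simp only [hrev, PySem.List.pyGetD_natCast, getD_map_cast _ _ htk,
    getD_map_cast _ _ (by simpa using htk : t < (eIdx xs).reverse.length),
    getD_reverse _ _ htk, PySem.List.pySetD_natCast]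
  rfl

lemma model_eq_alt (xs : List Int) :
    swapLoop xs ((eIdx xs).length / 2) = wbEvens xs ((xs.filter pEv).reverse) := by
  have hes : (xs.filter pEv).length = (eIdx xs).length := by
    rw [filter_eq_map_eIdx, List.length_map]
  obtain ⟨hl, h1, h2⟩ := swapLoop_inv xs ((eIdx xs).length / 2) (le_refl _)
  obtain ⟨b1, b2⟩ := wb_get xs ((xs.filter pEv).reverse)
    (by rw [List.length_reverse, hes])
  apply List.ext_getElem?
  intro j
  by_cases hj : j < xs.length
  · by_cases hmem : j ∈ eIdx xs
    · obtain ⟨r, hr, hjr⟩ := List.mem_iff_getElem.mp hmem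
      have hjr' : (eIdx xs).getD r 0 = j := by
        rw [List.getD_eq_getElem?_getD, List.getElem?_eq_getElem hr, hjr]
        rfl
      have hval : (swapLoop xs ((eIdx xs).length / 2))[j]? =
          some (xs.getD ((eIdx xs).getD ((eIdx xs).length - 1 - r) 0) 0) := by
        rw [← hjr', h1 r hr]
        by_cases hc : r < (eIdx xs).length / 2 ∨ (eIdx xs).length - 1 - r < (eIdx xs).length / 2
        · rw [if_pos hc]
        · rw [if_neg hc, ← (by omega : r = (eIdx xs).length - 1 - r)]
      have hes2 : ((xs.filter pEv).reverse)[r]? =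
          some (xs.getD ((eIdx xs).getD ((eIdx xs).length - 1 - r) 0) 0) := by
        rw [List.getElem?_reverse (by rw [hes]; exact hr)]
        have hkr : (eIdx xs).length - 1 - r < (eIdx xs).length := by omega
        rw [hes, filter_eq_map_eIdx, List.getElem?_map, List.getElem?_eq_getElem hkr]
        rw [List.getD_eq_getElem?_getD (l := eIdx xs), List.getElem?_eq_getElem hkr]
        rfl
      rw [hval, ← hjr', b1 r hr, hes2]
    · rw [h2 j hmem, b2 j hmem]
  · rw [List.getElem?_eq_none (by rw [hl]; omega),
      List.getElem?_eq_none (by rw [wb_length]; omega)]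

lemma main_eq (xs : List Int) : get_formatted_list xs = get_formatted_list_alt xs := by
  rw [L3, model_eq_alt]
  rfl

-- ===== VERDICT (by name: the statement is the Claim_ definition above) =====
theorem get_formatted_list_spec : Claim_equal_get_formatted_list := by
  intro array _
  show get_formatted_list array = get_formatted_list_alt array
  exact main_eq array
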